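-- pv_equiv track=rewrite | github.com/ArmaanT/camelcalc | camelcalc/utils.py | multiline_concat
-- ===== SOURCE A (Python) =====
-- def multiline_concat(
--     s1: str, s2: str, merge_from_bottom: bool = True, sep: str = "    "
-- ) -> str:
--     """
--     Horizontally joins two multiline strings using seperator `sep`
--     with proper spacing. Used to join two "column" of data
--     """
--
--     s1_split = s1.split("\n")
--     s2_split = s2.split("\n")
--
--     # Pad number of lines in each string to ensure they're equal
--     s1_split_length = len(s1_split)
--     s2_split_length = len(s2_split)
--     s1_fixed_length = [
--         "" for _ in range(max(s1_split_length, s2_split_length) - s1_split_length)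
--     ]
--     s2_fixed_length = [
--         "" for _ in range(max(s1_split_length, s2_split_length) - s2_split_length)
--     ]
--
--     # Determine merge order
--     if merge_from_bottom:
--         s1_fixed_length.extend(s1_split)
--         s2_fixed_length.extend(s2_split)
--     else:
--         s1_split.extend(s1_fixed_length)
--         s2_split.extend(s2_fixed_length)
--         s1_fixed_length = s1_split
--         s2_fixed_length = s2_split
--
--     # Pad each individual string within each column to ensure they're equal
--     s1_length_max = max(len(s) for s in s1_fixed_length)
--     s2_length_max = max(len(s) for s in s2_fixed_length)
--     s1_fixed_width = [f"{s:<{s1_length_max}}" for s in s1_fixed_length]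
--     s2_fixed_width = [f"{s:<{s2_length_max}}" for s in s2_fixed_length]
--
--     # Concatenate the two multiline strings
--     return "\n".join(sep.join(elem) for elem in zip(s1_fixed_width, s2_fixed_width))
-- ===== SOURCE B (Python) =====
-- def multiline_concat(s1, s2, merge_from_bottom=True, sep="    "):
--     """
--     Horizontally joins two multiline strings using seperator `sep`
--     with proper spacing. Used to join two "column" of data
--     """
--     l1 = s1.split("\n")
--     l2 = s2.split("\n")
--     w1 = max(map(len, l1))
--     w2 = max(map(len, l2))
--
--     def row(a, b):
--         return a.ljust(w1) + sep + b.ljust(w2)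
--
--     if merge_from_bottom:
--         # Pair lines starting from the bottom, then restore top-to-bottom order.
--         r1, r2 = l1[::-1], l2[::-1]
--         rows = [row(r1[i] if i < len(r1) else "", r2[i] if i < len(r2) else "")
--                 for i in range(max(len(r1), len(r2)))][::-1]
--     else:
--         rows = [row(l1[i] if i < len(l1) else "", l2[i] if i < len(l2) else "")
--                 for i in range(max(len(l1), len(l2)))]
--     return "\n".join(rows)
-- ===== Notes on version B (the rewrite author's own statement) =====
-- stated objective: alternative
-- what changed: Removes A's two-phase line-equalization (building empty-line padding lists, extending/prepending, then re-zipping the widened lists): B computes column widths from the raw splits and builds each output row directly by index-based longest-zip, reversing both line lists and the result for the bottom-merge case.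
import Mathlib
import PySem

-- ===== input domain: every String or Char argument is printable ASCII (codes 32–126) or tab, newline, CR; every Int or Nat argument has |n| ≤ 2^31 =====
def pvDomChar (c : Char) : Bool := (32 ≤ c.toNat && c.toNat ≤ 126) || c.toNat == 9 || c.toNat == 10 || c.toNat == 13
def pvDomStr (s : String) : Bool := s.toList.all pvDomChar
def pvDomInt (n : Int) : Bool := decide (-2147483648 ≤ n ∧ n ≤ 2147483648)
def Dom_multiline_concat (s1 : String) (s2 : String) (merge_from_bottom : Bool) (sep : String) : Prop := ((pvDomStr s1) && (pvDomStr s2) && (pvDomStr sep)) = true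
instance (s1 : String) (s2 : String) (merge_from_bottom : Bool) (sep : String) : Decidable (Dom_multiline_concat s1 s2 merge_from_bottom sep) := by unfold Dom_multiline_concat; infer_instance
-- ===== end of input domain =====

-- B replaces A's explicit empty-line padding/extension phase by a direct index-based
-- longest-zip over the raw splits (reversed for the bottom-merge case); same cost,
-- different decomposition. Equivalence of RETURN values is proved for all inputs in Dom.

-- hand port of f"{s:<{w}}" (left-justification with spaces, width a Nat): exact for
-- Python's nonnegative widths, which is all that occurs here
def pvLjust (cs : List Char) (w : Nat) : List Char :=
  cs ++ List.replicate (w - cs.length) ' '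

-- port of max(len(s) for s in l): lengths are ≥ 0 and l is nonempty at every call
-- site (str.split always returns at least one piece), so a foldl from 0 is exact
def pvMaxLen (l : List (List Char)) : Nat :=
  (l.map List.length).foldl Nat.max 0

-- ===== PORT A =====
def multiline_concat (s1 : String) (s2 : String) (merge_from_bottom : Bool) (sep : String) : String :=
  let s1_split := PySem.Chars.splitOn s1.toList ['\n']
  let s2_split := PySem.Chars.splitOn s2.toList ['\n']
  let s1_split_length := s1_split.length
  let s2_split_length := s2_split.length
  let s1_fixed_length₀ := List.replicate (max s1_split_length s2_split_length - s1_split_length) ([] : List Char)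
  let s2_fixed_length₀ := List.replicate (max s1_split_length s2_split_length - s2_split_length) ([] : List Char)
  let s1_fixed_length := if merge_from_bottom then s1_fixed_length₀ ++ s1_split else s1_split ++ s1_fixed_length₀
  let s2_fixed_length := if merge_from_bottom then s2_fixed_length₀ ++ s2_split else s2_split ++ s2_fixed_length₀
  let s1_length_max := pvMaxLen s1_fixed_length
  let s2_length_max := pvMaxLen s2_fixed_length
  let s1_fixed_width := s1_fixed_length.map (fun s => pvLjust s s1_length_max)
  let s2_fixed_width := s2_fixed_length.map (fun s => pvLjust s s2_length_max)
  String.ofList (PySem.Chars.join ['\n']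
    ((s1_fixed_width.zip s2_fixed_width).map (fun p => PySem.Chars.join sep.toList [p.1, p.2])))

-- ===== PORT B =====
def multiline_concat_alt (s1 : String) (s2 : String) (merge_from_bottom : Bool) (sep : String) : String :=
  let l1 := PySem.Chars.splitOn s1.toList ['\n']
  let l2 := PySem.Chars.splitOn s2.toList ['\n']
  let w1 := pvMaxLen l1
  let w2 := pvMaxLen l2
  let row := fun (a b : List Char) =>
    PySem.Chars.join [] [pvLjust a w1, sep.toList, pvLjust b w2]
  let rows :=
    if merge_from_bottom then
      let r1 := l1.reverse
      let r2 := l2.reverse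
      ((List.range (max r1.length r2.length)).map
        (fun i => row (r1.getD i []) (r2.getD i []))).reverse
    else
      (List.range (max l1.length l2.length)).map
        (fun i => row (l1.getD i []) (l2.getD i []))
  String.ofList (PySem.Chars.join ['\n'] rows)

-- ===== PRECONDITION & SPEC =====
def Spec_multiline_concat (s1 : String) (s2 : String) (merge_from_bottom : Bool) (sep : String) (out : String) : Prop := out = multiline_concat_alt s1 s2 merge_from_bottom sep
instance (s1 : String) (s2 : String) (merge_from_bottom : Bool) (sep : String) (out : String) : Decidable (Spec_multiline_concat s1 s2 merge_from_bottom sep out) := by unfold Spec_multiline_concat; infer_instance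

-- ===== CLAIM (what is proved, stated in full; the proofs are below) =====
def Claim_equal_multiline_concat : Prop := ∀ (s1 : String) (s2 : String) (merge_from_bottom : Bool) (sep : String), Dom_multiline_concat s1 s2 merge_from_bottom sep → Spec_multiline_concat s1 s2 merge_from_bottom sep (multiline_concat s1 s2 merge_from_bottom sep)

-- ===== LEMMAS AND PROOFS =====

lemma foldl_max_replicate_zero (k : Nat) (a : Nat) :
    (List.replicate k 0).foldl Nat.max a = a := by
  induction k generalizing a with
  | zero => rfl
  | succ n ih => simp [List.replicate_succ, List.foldl_cons, ih]

lemma pvMaxLen_append_pad (l : List (List Char)) (k : Nat) :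
    pvMaxLen (l ++ List.replicate k ([] : List Char)) = pvMaxLen l := by
  simp [pvMaxLen, List.foldl_append, foldl_max_replicate_zero]

lemma pvMaxLen_pad_append (l : List (List Char)) (k : Nat) :
    pvMaxLen (List.replicate k ([] : List Char) ++ l) = pvMaxLen l := by
  simp [pvMaxLen, List.foldl_append, foldl_max_replicate_zero]

-- zip_longest as an indexed map: padding both lists with e up to the common length
-- and zipping is the same as indexing both lists with default e
lemma getElem_append_replicate {α : Type} (xs : List α) (e : α) (k i : Nat)
    (h : i < (xs ++ List.replicate k e).length) :
    (xs ++ List.replicate k e)[i] = xs.getD i e := by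
  by_cases hi : i < xs.length
  · rw [List.getElem_append_left hi, List.getD_eq_getElem _ _ hi]
  · rw [List.getElem_append_right (Nat.le_of_not_lt hi), List.getElem_replicate,
      List.getD_eq_default _ _ (Nat.le_of_not_lt hi)]

-- zip_longest as an indexed map: padding both lists with e up to the common length
-- and zipping is the same as indexing both lists with default e
lemma zip_pad_eq_range_map {α : Type} (xs ys : List α) (e : α) :
    (xs ++ List.replicate (max xs.length ys.length - xs.length) e).zip
      (ys ++ List.replicate (max xs.length ys.length - ys.length) e)
    = (List.range (max xs.length ys.length)).map (fun i => (xs.getD i e, ys.getD i e)) := by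
  apply List.ext_getElem
  · simp
  · intro i h1 h2
    simp only [List.getElem_zip, List.getElem_map, List.getElem_range,
      getElem_append_replicate]

lemma zip_reverse_of_length_eq {α β : Type} (a : List α) (b : List β)
    (h : a.length = b.length) :
    a.reverse.zip b.reverse = (a.zip b).reverse := by
  apply List.ext_getElem
  · simp
  · intro i h1 h2
    have hz : (a.zip b).length = a.length := by simp [h]
    simp only [List.getElem_zip, List.getElem_reverse, List.getElem_zip]
    congr 2 <;> omega

lemma join_sep_pair (sep a b : List Char) :
    PySem.Chars.join sep [a, b] = PySem.Chars.join [] [a, sep, b] := by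
  simp [PySem.Chars.join_cons_cons, PySem.Chars.join_singleton]

-- ===== VERDICT (by name: the statement is the Claim_ definition above) =====
lemma rows_eq (l1 l2 : List (List Char)) (sep : List Char) (w1 w2 : Nat) :
    (((l1 ++ List.replicate (max l1.length l2.length - l1.length) ([] : List Char)).map
        (fun s => pvLjust s w1)).zip
      ((l2 ++ List.replicate (max l1.length l2.length - l2.length) ([] : List Char)).map
        (fun s => pvLjust s w2))).map
        (fun p => PySem.Chars.join sep [p.1, p.2])
    = (List.range (max l1.length l2.length)).map
        (fun i => PySem.Chars.join []
          [pvLjust (l1.getD i []) w1, sep, pvLjust (l2.getD i []) w2]) := by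
  simp only [List.zip_map, List.map_map, zip_pad_eq_range_map, Function.comp_def,
    Prod.map, join_sep_pair]

lemma rows_eq_bottom (l1 l2 : List (List Char)) (sep : List Char) (w1 w2 : Nat) :
    (((List.replicate (max l1.length l2.length - l1.length) ([] : List Char) ++ l1).map
        (fun s => pvLjust s w1)).zip
      ((List.replicate (max l1.length l2.length - l2.length) ([] : List Char) ++ l2).map
        (fun s => pvLjust s w2))).map
        (fun p => PySem.Chars.join sep [p.1, p.2])
    = ((List.range (max l1.reverse.length l2.reverse.length)).map
        (fun i => PySem.Chars.join []
          [pvLjust (l1.reverse.getD i []) w1, sep, pvLjust (l2.reverse.getD i []) w2])).reverse := by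
  rw [← rows_eq l1.reverse l2.reverse sep w1 w2]
  rw [← List.map_reverse]
  rw [← zip_reverse_of_length_eq _ _ (by simp)]
  simp [List.reverse_append, List.map_reverse]

theorem multiline_concat_spec : Claim_equal_multiline_concat := by
  intro s1 s2 merge_from_bottom sep _
  unfold Spec_multiline_concat
  cases merge_from_bottom with
  | false =>
      simp only [multiline_concat, multiline_concat_alt, Bool.false_eq_true, if_false,
        pvMaxLen_append_pad]
      rw [rows_eq]
  | true =>
      simp only [multiline_concat, multiline_concat_alt, if_true, pvMaxLen_pad_append]
      rw [rows_eq_bottom]
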